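-- pv_equiv track=rewrite | github.com/ziebam/aoc2024 | day05/day05.py | get_rulesets
-- ===== SOURCE A (Python) =====
-- def get_rulesets(rules):
--     rulesets = dict()
--
--     for rule in rules.split():
--         before, after = rule.split("|")
--
--         if before not in rulesets:
--             rulesets[before] = set()
--
--         rulesets[before].add(after)
--
--     return rulesets
-- ===== SOURCE B (Python) =====
-- def get_rulesets(rules):
--     pairs = [rule.split("|") for rule in rules.split()]
--     return {p[0]: {q[1] for q in pairs if q[0] == p[0]} for p in pairs}
-- ===== Notes on version B (the rewrite author's own statement) =====
-- stated objective: simpler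
-- what changed: A's stateful loop (insert-empty-set-then-mutate on a dict) is replaced by building the list of before/after pairs once and returning a dict comprehension whose values are set comprehensions over that list.
import Mathlib
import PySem

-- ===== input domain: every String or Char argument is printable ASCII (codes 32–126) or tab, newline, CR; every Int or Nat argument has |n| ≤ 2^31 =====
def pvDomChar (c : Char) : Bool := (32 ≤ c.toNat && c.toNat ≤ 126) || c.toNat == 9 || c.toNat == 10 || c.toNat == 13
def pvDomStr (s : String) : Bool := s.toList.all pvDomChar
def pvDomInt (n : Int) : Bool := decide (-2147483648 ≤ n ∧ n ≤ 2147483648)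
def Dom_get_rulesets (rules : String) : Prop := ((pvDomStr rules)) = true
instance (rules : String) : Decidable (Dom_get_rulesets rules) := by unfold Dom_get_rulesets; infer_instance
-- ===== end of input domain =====

-- B replaces A's incremental dict-of-sets loop by a pair list plus a dict comprehension
-- whose values are set comprehensions over that list (objective: simpler).

-- rule.split("|"): the separator is the non-empty literal "|", so Str.split? is never none
def pvSplitBar (t : String) : List String := (PySem.Str.split? t "|").getD []

-- ===== PORT A =====
def get_rulesets (rules : String) : List (String × List String) :=
  ((PySem.Str.split₀ rules).foldl (fun d rule =>
      match pvSplitBar rule with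
      | [before, after] =>
        let d' := if d.contains before then d else d.insert before PySem.Set.empty
        d'.modify before PySem.Set.empty (fun s => PySem.Set.add s after)
      | _ => d       -- Python raises ValueError here (unpacking ≠ 2 parts); excluded by Pre_
    ) PySem.Dict.empty).items

-- ===== PORT B =====
def get_rulesets_alt (rules : String) : List (String × List String) :=
  let pairs := (PySem.Str.split₀ rules).map (fun rule => pvSplitBar rule)
  -- p[0] / q[1] ported with PySem.List.pyGetD; the defaults are never read on Pre_
  -- (p[0] always exists; q[1] exists whenever the token contains a '|').
  (pairs.foldl (fun d p =>
      d.insert (PySem.List.pyGetD p 0 "")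
        (PySem.Set.ofList
          ((pairs.filter (fun q => PySem.List.pyGetD q 0 "" == PySem.List.pyGetD p 0 "")).map
            (fun q => PySem.List.pyGetD q 1 "")))
    ) PySem.Dict.empty).items

-- ===== PRECONDITION & SPEC =====
-- Pre_ excludes exactly the inputs on which A raises ValueError: a whitespace-separated
-- token whose split on "|" does not give exactly two parts.
def Pre_get_rulesets (rules : String) : Prop :=
  ∀ t ∈ PySem.Str.split₀ rules, (pvSplitBar t).length = 2
instance (rules : String) : Decidable (Pre_get_rulesets rules) := by unfold Pre_get_rulesets; infer_instance
def pvWitness_get_rulesets : String := "47|53 97|13 97|61 47|61 53|61"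

def Spec_get_rulesets (rules : String) (out : List (String × List String)) : Prop := out = get_rulesets_alt rules
instance (rules : String) (out : List (String × List String)) : Decidable (Spec_get_rulesets rules out) := by unfold Spec_get_rulesets; infer_instance

-- ===== CLAIM (what is proved, stated in full; the proofs are below) =====
def Claim_equal_get_rulesets : Prop := ∀ (rules : String), Dom_get_rulesets rules → Pre_get_rulesets rules → Spec_get_rulesets rules (get_rulesets rules)

-- ===== LEMMAS AND PROOFS =====

-- the second components of the pairs whose first component is b, in order
def pvAfters (ps : List (String × String)) (b : String) : List String :=
  (ps.filter (fun q => q.1 == b)).map Prod.snd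

-- the common normal form of both folds: keys in first-occurrence order, each with its set
def pvCanon (ps : List (String × String)) : List (String × List String) :=
  (PySem.List.dedup (ps.map Prod.fst)).map (fun b => (b, PySem.Set.ofList (pvAfters ps b)))

lemma pvOfList_append_singleton (l : List String) (x : String) :
    PySem.Set.ofList (l ++ [x]) = PySem.Set.add (PySem.Set.ofList l) x := by
  simp [PySem.Set.ofList_eq_foldl, List.foldl_append]

lemma pvOfList_snoc (l : List String) (x : String) :
    PySem.Set.ofList (l ++ [x]) =
      if x ∈ l then PySem.Set.ofList l else PySem.Set.ofList l ++ [x] := by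
  rw [pvOfList_append_singleton,
    show ∀ s y, PySem.Set.add s y = if PySem.Set.contains s y then s else s ++ [y] from fun _ _ => rfl]
  by_cases h : x ∈ l
  · rw [if_pos ((PySem.Set.contains_iff _ _).mpr ((PySem.Set.mem_ofList l x).mpr h)), if_pos h]
  · have hc : ¬ (PySem.Set.contains (PySem.Set.ofList l) x = true) := by
      rw [PySem.Set.contains_iff, PySem.Set.mem_ofList]; exact h
    rw [if_neg hc, if_neg h]

lemma pvAfters_append (ps : List (String × String)) (b a c : String) :
    pvAfters (ps ++ [(b, a)]) c = pvAfters ps c ++ (if c = b then [a] else []) := by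
  rcases eq_or_ne c b with h|h
  · simp [pvAfters, List.filter_append, h]
  · simp [pvAfters, List.filter_append, h, Ne.symm h]

lemma pvAfters_of_not_mem (ps : List (String × String)) (b : String) (h : b ∉ ps.map Prod.fst) :
    pvAfters ps b = [] := by
  unfold pvAfters
  have hf : List.filter (fun q => q.1 == b) ps = [] := by
    apply List.filter_eq_nil_iff.mpr
    intro q hq e
    exact h ((beq_iff_eq.mp e) ▸ List.mem_map_of_mem hq)
  rw [hf, List.map_nil]

lemma pvFoldB_items (v : String → List String) (ps : List (String × String)) :
    ((ps.foldl (fun d x => d.insert x.1 (v x.1)) PySem.Dict.empty).items)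
      = (PySem.List.dedup (ps.map Prod.fst)).map (fun b => (b, v b)) := by
  simp only [PySem.List.dedup_eq_ofList]
  induction ps using List.reverseRecOn with
  | nil => rfl
  | append_singleton ps x ih =>
    rw [List.foldl_append, List.foldl_cons, List.foldl_nil]
    set D := ps.foldl (fun d x => d.insert x.1 (v x.1)) PySem.Dict.empty with hD
    have hkeys : D.keys = PySem.Set.ofList (ps.map Prod.fst) := by
      show D.items.map Prod.fst = _
      rw [ih, List.map_map,
        show (Prod.fst ∘ fun b => (b, v b)) = id from rfl, List.map_id]
    rw [PySem.Dict.items_insert, ih]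
    simp only [List.map_append, List.map_cons, List.map_nil, pvOfList_snoc]
    by_cases h : x.1 ∈ ps.map Prod.fst
    · have hc : D.contains x.1 = true := by
        rw [PySem.Dict.contains_eq_decide_mem_keys, hkeys]
        simpa [PySem.Set.mem_ofList] using h
      rw [if_pos hc, if_pos h, List.map_map]
      apply List.map_congr_left
      intro b hb
      by_cases e : b = x.1 <;> simp [e]
    · have hc : ¬ (D.contains x.1 = true) := by
        rw [PySem.Dict.contains_eq_decide_mem_keys, hkeys]
        simpa [PySem.Set.mem_ofList] using h
      rw [if_neg hc, if_neg h, List.map_append, List.map_cons, List.map_nil]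

lemma pvFoldA_items (ps : List (String × String)) :
    ((ps.foldl (fun d x =>
        let d' := if d.contains x.1 then d else d.insert x.1 PySem.Set.empty
        d'.modify x.1 PySem.Set.empty (fun s => PySem.Set.add s x.2)) PySem.Dict.empty).items)
      = pvCanon ps := by
  unfold pvCanon
  simp only [PySem.List.dedup_eq_ofList]
  induction ps using List.reverseRecOn with
  | nil => rfl
  | append_singleton ps x ih =>
    rw [List.foldl_append, List.foldl_cons, List.foldl_nil]
    set D := ps.foldl (fun d x =>
        let d' := if d.contains x.1 then d else d.insert x.1 PySem.Set.empty
        d'.modify x.1 PySem.Set.empty (fun s => PySem.Set.add s x.2)) PySem.Dict.empty with hD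
    have hkeys : D.keys = PySem.Set.ofList (ps.map Prod.fst) := by
      show D.items.map Prod.fst = _
      rw [ih, List.map_map,
        show (Prod.fst ∘ fun b => (b, PySem.Set.ofList (pvAfters ps b))) = id from rfl,
        List.map_id]
    have hnd : D.keys.Nodup := by
      rw [hkeys, ← PySem.List.dedup_eq_ofList]; exact PySem.List.nodup_dedup _
    show ((if D.contains x.1 then D else D.insert x.1 PySem.Set.empty).modify x.1
        PySem.Set.empty (fun s => PySem.Set.add s x.2)).items
      = (PySem.Set.ofList ((ps ++ [x]).map Prod.fst)).map
          (fun b => (b, PySem.Set.ofList (pvAfters (ps ++ [x]) b)))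
    rw [List.map_append, List.map_cons, List.map_nil, pvOfList_snoc]
    by_cases h : x.1 ∈ ps.map Prod.fst
    · have hc : D.contains x.1 = true := by
        rw [PySem.Dict.contains_eq_decide_mem_keys, hkeys]
        simpa [PySem.Set.mem_ofList] using h
      rw [if_pos hc, if_pos h]
      have hmem : (x.1, PySem.Set.ofList (pvAfters ps x.1)) ∈ D.items := by
        rw [ih]
        exact List.mem_map_of_mem (by simpa [PySem.Set.mem_ofList] using h)
      have hgetD : D.getD x.1 PySem.Set.empty = PySem.Set.ofList (pvAfters ps x.1) :=
        PySem.Dict.getD_of_mem_items D hmem hnd _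
      show (D.insert x.1 (PySem.Set.add (D.getD x.1 PySem.Set.empty) x.2)).items = _
      rw [hgetD, ← pvOfList_append_singleton,
        PySem.Dict.items_insert_of_contains _ _ hc, ih, List.map_map]
      apply List.map_congr_left
      intro b hb
      rcases eq_or_ne b x.1 with e|e
      · have hx : x = (x.1, x.2) := rfl
        simp [e, hx ▸ pvAfters_append ps x.1 x.2 x.1]
      · have hx : x = (x.1, x.2) := rfl
        simp [e, hx ▸ pvAfters_append ps x.1 x.2 b]
    · have hc : D.contains x.1 = false := by
        rw [PySem.Dict.contains_eq_decide_mem_keys, hkeys]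
        simpa [PySem.Set.mem_ofList] using h
      rw [if_neg (by simp [hc]), if_neg h]
      show ((D.insert x.1 PySem.Set.empty).insert x.1
        (PySem.Set.add ((D.insert x.1 PySem.Set.empty).getD x.1 PySem.Set.empty) x.2)).items = _
      rw [PySem.Dict.insert_insert_self, PySem.Dict.getD_insert_self,
        show PySem.Set.add PySem.Set.empty x.2 = [x.2] from rfl,
        PySem.Dict.items_insert_of_not_contains _ _ hc, ih, List.map_append]
      have hx : x = (x.1, x.2) := rfl
      congr 1
      · apply List.map_congr_left
        intro b hb
        have hbne : b ≠ x.1 := fun e =>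
          h (e ▸ ((PySem.Set.mem_ofList _ _).mp hb))
        simp [hx ▸ pvAfters_append ps x.1 x.2 b, hbne]
      · simp [hx ▸ pvAfters_append ps x.1 x.2 x.1,
          pvAfters_of_not_mem ps x.1 h]
        rfl

lemma pvExists_pairs (L : List (List String)) (h : ∀ p ∈ L, p.length = 2) :
    ∃ ps : List (String × String), L = ps.map (fun x => [x.1, x.2]) := by
  induction L with
  | nil => exact ⟨[], rfl⟩
  | cons p L ih =>
    obtain ⟨ps, hps⟩ := ih (fun q hq => h q (List.mem_cons_of_mem _ hq))
    match p, h p (List.mem_cons_self) with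
    | [b, a], _ => exact ⟨(b, a) :: ps, by simp [hps]⟩

-- ===== VERDICT (by name: the statement is the Claim_ definition above) =====
theorem get_rulesets_spec : Claim_equal_get_rulesets := by
  intro rules _ hpre
  show get_rulesets rules = get_rulesets_alt rules
  obtain ⟨ps, hps⟩ := pvExists_pairs ((PySem.Str.split₀ rules).map (fun t => pvSplitBar t))
    (by intro p hp
        obtain ⟨t, ht, rfl⟩ := List.mem_map.mp hp
        exact hpre t ht)
  -- A's side: fold over the tokens = fold over the split pair lists
  have hA : get_rulesets rules
      = ((((PySem.Str.split₀ rules).map (fun t => pvSplitBar t)).foldl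
          (fun d p =>
            match p with
            | [before, after] =>
              let d' := if d.contains before then d else d.insert before PySem.Set.empty
              d'.modify before PySem.Set.empty (fun s => PySem.Set.add s after)
            | _ => d) PySem.Dict.empty).items) := by
    unfold get_rulesets
    rw [List.foldl_map]
  rw [hA, hps]
  unfold get_rulesets_alt
  simp only [hps, List.foldl_map, List.filter_map, List.map_map]
  exact Eq.trans (pvFoldA_items ps)
    (Eq.trans (pvFoldB_items (fun b => PySem.Set.ofList (pvAfters ps b)) ps).symm rfl)
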